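-- pv_equiv track=rewrite | github.com/SaswatiGhosh/Smart_Doc_Intelligence | myproject_doc_intelligence/myproject_doc_intelligence/views.py | fileNameEdit
-- ===== SOURCE A (Python) =====
-- def fileNameEdit(name):
--     name = name.lower()
--     editedName = ""
--     c = 0
--     for i in name:
--         if c > 15:
--             break
--         if 97 <= ord(i) <= 122 or 48 <= ord(i) <= 57:
--             editedName += i
--         else:
--             editedName += "_"
--         c += 1
--     return editedName
-- ===== SOURCE B (Python) =====
-- _TABLE = str.maketrans({chr(i): (chr(i) if 97 <= i <= 122 or 48 <= i <= 57 else '_')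
--                         for i in range(128)})
--
-- def fileNameEdit(name):
--     return name.lower().translate(_TABLE)[:16]
-- ===== Notes on version B (the rewrite author's own statement) =====
-- stated objective: idiomatic
-- what changed: Replaces the per-character ord-range classification loop with an accumulator and break counter by a 128-entry translation table built once with str.maketrans, a single str.translate pass over the whole lowercased name, and a final slice to 16 characters.
import Mathlib
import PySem

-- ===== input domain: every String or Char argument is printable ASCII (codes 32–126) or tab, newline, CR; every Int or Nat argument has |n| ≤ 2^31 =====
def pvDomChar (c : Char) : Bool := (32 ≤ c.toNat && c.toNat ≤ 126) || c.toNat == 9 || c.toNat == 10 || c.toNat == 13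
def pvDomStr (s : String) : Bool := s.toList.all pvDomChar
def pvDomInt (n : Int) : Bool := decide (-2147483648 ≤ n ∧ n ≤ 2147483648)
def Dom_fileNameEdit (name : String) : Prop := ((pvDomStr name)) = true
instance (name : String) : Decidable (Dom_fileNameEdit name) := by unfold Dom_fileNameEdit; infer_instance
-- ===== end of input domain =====

-- B replaces A's per-character classification loop by a 128-entry translation table
-- built once (str.maketrans) and one translate pass, then a slice to 16 (idiomatic).

-- ===== PORT A =====
-- the loop over `name` with accumulator `editedName` and counter `c`, breaking once c > 15
def fileNameEditGo : List Char → List Char → Int → List Char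
  | [], acc, _ => acc
  | i :: rest, acc, c =>
    if c > 15 then acc
    else fileNameEditGo rest
      (acc ++ [if (97 ≤ i.toNat ∧ i.toNat ≤ 122) ∨ (48 ≤ i.toNat ∧ i.toNat ≤ 57) then i else '_'])
      (c + 1)

def fileNameEdit (name : String) : String :=
  String.ofList (fileNameEditGo (PySem.Str.lower name).toList [] 0)

-- ===== PORT B =====
-- the dict comprehension `{chr(i): chr(i) if 97<=i<=122 or 48<=i<=57 else '_' for i in range(128)}`
def pvTable : PySem.Dict Char Char :=
  (PySem.List.pyRange 0 128 1).foldl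
    (fun d i =>
      d.insert (Char.ofNat i.toNat)
        (if (97 ≤ i ∧ i ≤ 122) ∨ (48 ≤ i ∧ i ≤ 57) then Char.ofNat i.toNat else '_'))
    PySem.Dict.empty

-- str.translate: per code point, the table's entry; a char missing from the table is unchanged
def fileNameEdit_alt (name : String) : String :=
  String.ofList (PySem.List.slice
    ((PySem.Str.lower name).toList.map (fun c => pvTable.getD c c)) none (some 16))

-- ===== PRECONDITION & SPEC =====
def Spec_fileNameEdit (name : String) (out : String) : Prop := out = fileNameEdit_alt name
instance (name : String) (out : String) : Decidable (Spec_fileNameEdit name out) := by unfold Spec_fileNameEdit; infer_instance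

-- ===== CLAIM =====
def Claim_equal_fileNameEdit : Prop := ∀ (name : String), Dom_fileNameEdit name → Spec_fileNameEdit name (fileNameEdit name)

-- ===== LEMMAS AND PROOFS =====
def fileNameEditSan (i : Char) : Char :=
  if (97 ≤ i.toNat ∧ i.toNat ≤ 122) ∨ (48 ≤ i.toNat ∧ i.toNat ≤ 57) then i else '_'

lemma fileNameEditGo_eq (xs : List Char) : ∀ (acc : List Char) (c : Int), 0 ≤ c →
    fileNameEditGo xs acc c = acc ++ (xs.take (16 - c).toNat).map fileNameEditSan := by
  induction xs with
  | nil => intro acc c _; simp [fileNameEditGo]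
  | cons i rest ih =>
    intro acc c hc
    by_cases h : c > 15
    · have : (16 - c).toNat = 0 := by omega
      simp [fileNameEditGo, h, this]
    · have h16 : (16 - c).toNat = ((16 - (c + 1)).toNat) + 1 := by omega
      simp only [fileNameEditGo, if_neg h, ih (acc ++ [_]) (c + 1) (by omega), h16,
        List.take_succ_cons, List.map_cons, List.append_assoc, List.singleton_append, fileNameEditSan]

-- the table agrees with the range tests on every ASCII code point
set_option maxRecDepth 4096 in
lemma pvTable_getD_ascii : ∀ n : Fin 128,
    pvTable.getD (Char.ofNat n.val) (Char.ofNat n.val) = fileNameEditSan (Char.ofNat n.val) := by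
  decide

-- lowercasing an ASCII character stays ASCII
lemma lowerChar_ascii : ∀ n : Fin 128, (PySem.Chars.lowerChar (Char.ofNat n.val)).toNat < 128 := by
  decide

lemma ofNat_toNat_of_lt (c : Char) (_h : c.toNat < 128) : Char.ofNat c.toNat = c :=
  Char.ofNat_toNat c

lemma pvTable_getD_of_lt (c : Char) (h : c.toNat < 128) :
    pvTable.getD c c = fileNameEditSan c := by
  have := pvTable_getD_ascii ⟨c.toNat, h⟩
  rwa [ofNat_toNat_of_lt c h] at this

lemma lowered_ascii (name : String) (hd : Dom_fileNameEdit name) :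
    ∀ c ∈ (PySem.Str.lower name).toList, c.toNat < 128 := by
  intro c hc
  rw [PySem.Str.toList_lower, PySem.Chars.lower] at hc
  obtain ⟨b, hb, rfl⟩ := List.mem_map.1 hc
  have hdom : pvDomChar b = true := by
    have := (List.all_eq_true.1 hd) b hb
    exact this
  have hb128 : b.toNat < 128 := by
    simp only [pvDomChar, Bool.or_eq_true, Bool.and_eq_true, decide_eq_true_eq, beq_iff_eq] at hdom
    omega
  have := lowerChar_ascii ⟨b.toNat, hb128⟩
  rwa [ofNat_toNat_of_lt b hb128] at this

-- ===== VERDICT =====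
theorem fileNameEdit_spec : Claim_equal_fileNameEdit := by
  intro name hd
  unfold Spec_fileNameEdit fileNameEdit fileNameEdit_alt
  rw [PySem.List.slice_to _ (by norm_num), fileNameEditGo_eq _ [] 0 (by norm_num),
    List.map_take, List.map_congr_left (fun c hc => pvTable_getD_of_lt c (lowered_ascii name hd c hc))]
  rfl
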